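-- pv_equiv track=rewrite | github.com/aineniamh/raccoon | raccoon/utils/phylo_functions.py | _has_adr_cluster
-- ===== SOURCE A (Python) =====
-- def _has_adr_cluster(sites, window, min_count):
--     if len(sites) < min_count:
--         return False
--     sites = sorted(sites)
--     for i in range(len(sites) - min_count + 1):
--         if sites[i + min_count - 1] - sites[i] <= window:
--             return True
--     return False
-- ===== SOURCE B (Python) =====
-- def _has_adr_cluster(sites, window, min_count):
--     if len(sites) < min_count:
--         return False
--     s = sorted(sites)
--     left = 0
--     for right in range(len(s)):
--         while left <= right and s[right] - s[left] > window:
--             left += 1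
--         if right - left + 1 >= min_count:
--             return True
--     return False
-- ===== Notes on version B (the rewrite author's own statement) =====
-- stated objective: alternative
-- what changed: Replaces A's scan over every fixed window of exactly min_count consecutive sorted sites by a two-pointer sliding window that advances a left index and checks the running window size once per element.
-- outside the precondition, e.g. on _has_adr_cluster([1, 2], 5, -1): A returns True, B returns True; on _has_adr_cluster([1, 2], -3, 0): A raises IndexError, B returns True; on _has_adr_cluster([], 0, 0): A raises IndexError, B returns False
import Mathlib
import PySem

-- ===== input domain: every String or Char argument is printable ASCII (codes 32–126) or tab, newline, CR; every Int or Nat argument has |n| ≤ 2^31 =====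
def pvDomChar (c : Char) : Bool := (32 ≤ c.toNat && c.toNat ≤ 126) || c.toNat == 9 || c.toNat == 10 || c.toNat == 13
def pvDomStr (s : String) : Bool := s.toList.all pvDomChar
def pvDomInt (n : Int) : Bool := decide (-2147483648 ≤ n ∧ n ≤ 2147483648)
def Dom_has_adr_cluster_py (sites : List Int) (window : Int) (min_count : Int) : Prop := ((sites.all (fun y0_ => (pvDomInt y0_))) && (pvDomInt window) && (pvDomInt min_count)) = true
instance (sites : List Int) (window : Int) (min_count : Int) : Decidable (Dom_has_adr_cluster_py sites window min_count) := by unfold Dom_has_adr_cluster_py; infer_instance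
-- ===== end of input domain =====

-- B replaces A's fixed-offset scan over all windows of exactly min_count sites by a
-- two-pointer sliding window over the sorted list (objective: alternative decomposition).

-- ===== PORT A =====
-- literal transliteration of A; a pyGet? returning none is Python's IndexError,
-- excluded by Pre_ (min_count ≥ 1 keeps every index in range)
def has_adr_cluster_py (sites : List Int) (window : Int) (min_count : Int) : Bool :=
  if (sites.length : Int) < min_count then false
  else
    let s := PySem.List.sorted sites (fun x => x) false
    (PySem.List.pyRange 0 ((s.length : Int) - min_count + 1) 1).any (fun i =>
      match PySem.List.pyGet? s (i + min_count - 1), PySem.List.pyGet? s i with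
      | some a, some b => decide (a - b ≤ window)
      | _, _ => false)

-- ===== PORT B =====
-- the inner 'while left <= right and s[right] - s[left] > window: left += 1'
-- (indices are Nat and provably in range, so s.getD · 0 is exact here)
def pvAdv (s : List Int) (window : Int) (right : Nat) (left : Nat) : Nat :=
  if left ≤ right ∧ s.getD right 0 - s.getD left 0 > window then pvAdv s window right (left + 1)
  else left
termination_by right + 1 - left

-- the outer 'for right in range(len(s))' loop of B with early return
def pvGo (s : List Int) (window : Int) (min_count : Int) (right : Nat) (left : Nat) : Bool :=
  if right < s.length then
    let l := pvAdv s window right left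
    if (right : Int) - l + 1 ≥ min_count then true
    else pvGo s window min_count (right + 1) l
  else false
termination_by s.length - right

def has_adr_cluster_py_alt (sites : List Int) (window : Int) (min_count : Int) : Bool :=
  if (sites.length : Int) < min_count then false
  else pvGo (PySem.List.sorted sites (fun x => x) false) window min_count 0 0

-- ===== PRECONDITION & SPEC =====
-- Pre_ excludes min_count ≤ 0: there A's scan either raises IndexError partway
-- (always on empty input) or returns True only via Python's negative-index
-- wraparound sites[min_count-1], an accident of A's indexing.
def Pre_has_adr_cluster_py (sites : List Int) (window : Int) (min_count : Int) : Prop :=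
  1 ≤ min_count

instance (sites : List Int) (window : Int) (min_count : Int) : Decidable (Pre_has_adr_cluster_py sites window min_count) := by unfold Pre_has_adr_cluster_py; infer_instance

def pvWitness_has_adr_cluster_py : List Int × Int × Int := ([3, 1, 7, 2], 4, 3)

def Spec_has_adr_cluster_py (sites : List Int) (window : Int) (min_count : Int) (out : Bool) : Prop := out = has_adr_cluster_py_alt sites window min_count
instance (sites : List Int) (window : Int) (min_count : Int) (out : Bool) : Decidable (Spec_has_adr_cluster_py sites window min_count out) := by unfold Spec_has_adr_cluster_py; infer_instance

-- ===== CLAIM (what is proved, stated in full; the proofs are below) =====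
def Claim_equal_has_adr_cluster_py : Prop := ∀ (sites : List Int) (window : Int) (min_count : Int), Dom_has_adr_cluster_py sites window min_count → Pre_has_adr_cluster_py sites window min_count → Spec_has_adr_cluster_py sites window min_count (has_adr_cluster_py sites window min_count)

-- ===== LEMMAS AND PROOFS =====

-- sorted lists: getD is monotone on in-range indices
theorem pv_getD_mono {s : List Int} (hs : s.Pairwise (· ≤ ·)) {i j : Nat}
    (hij : i ≤ j) (hj : j < s.length) : s.getD i 0 ≤ s.getD j 0 := by
  rcases Nat.eq_or_lt_of_le hij with rfl | h
  · exact le_refl _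
  · have hi : i < s.length := lt_trans h hj
    rw [List.getD_eq_getElem s 0 hi, List.getD_eq_getElem s 0 hj]
    exact List.pairwise_iff_getElem.mp hs i j hi hj h

-- pvAdv: lower bound, upper bound, everything skipped is too far, stop condition
theorem pvAdv_le_succ {s : List Int} {w : Int} {right : Nat} :
    ∀ left, left ≤ right + 1 → pvAdv s w right left ≤ right + 1 := by
  intro left
  fun_induction pvAdv s w right left with
  | case1 left hc ih => intro _; exact ih (by omega)
  | case2 left hc => intro h; exact h

theorem pvAdv_skipped {s : List Int} {w : Int} {right left : Nat} :
    ∀ j, left ≤ j → j < pvAdv s w right left → s.getD right 0 - s.getD j 0 > w := by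
  fun_induction pvAdv s w right left with
  | case1 left hc ih =>
    intro j hj1 hj2
    rcases Nat.eq_or_lt_of_le hj1 with rfl | h
    · exact hc.2
    · exact ih j h hj2
  | case2 left hc => intro j hj1 hj2; omega

theorem pvAdv_stop {s : List Int} {w : Int} {right left : Nat} :
    pvAdv s w right left ≤ right →
    s.getD right 0 - s.getD (pvAdv s w right left) 0 ≤ w := by
  fun_induction pvAdv s w right left with
  | case1 left hc ih => exact ih
  | case2 left hc =>
    intro h
    by_cases hlr : left ≤ right
    · have := not_and.mp hc hlr; omega
    · omega

-- the existential form decided by B's main loop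
def pvHit (s : List Int) (w m : Int) (right : Nat) : Prop :=
  ∃ r l : Nat, right ≤ r ∧ r < s.length ∧ l ≤ r ∧ (r : Int) - l + 1 ≥ m ∧
    s.getD r 0 - s.getD l 0 ≤ w

theorem pvGo_iff {s : List Int} {w m : Int} (hs : s.Pairwise (· ≤ ·)) (hm : 1 ≤ m) :
    ∀ right left, left ≤ right →
    (∀ j, j < left → ∀ r, right ≤ r → r < s.length → s.getD r 0 - s.getD j 0 > w) →
    (pvGo s w m right left = true ↔ pvHit s w m right) := by
  intro right left
  fun_induction pvGo s w m right left with
  | case1 right left hr l hcnt =>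
    intro hlr hskip
    simp only [pvHit]
    constructor
    · intro _
      have hl_le : l ≤ right := by
        have hub : l ≤ right + 1 := pvAdv_le_succ left (by omega)
        omega
      exact ⟨right, l, le_refl _, hr, hl_le, hcnt, pvAdv_stop hl_le⟩
    · intro _; trivial
  | case2 right left hr l hcnt ih =>
    intro hlr hskip
    have hldef : l = pvAdv s w right left := rfl
    have hub : l ≤ right + 1 := pvAdv_le_succ left (by omega)
    have hskip' : ∀ j, j < l → ∀ r, right + 1 ≤ r → r < s.length → s.getD r 0 - s.getD j 0 > w := by
      intro j hj r hrr hrn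
      have hjr : s.getD right 0 - s.getD j 0 > w := by
        by_cases hjl : j < left
        · exact hskip j hjl right (le_refl _) hr
        · exact pvAdv_skipped j (by omega) hj
      have hmono : s.getD right 0 ≤ s.getD r 0 := pv_getD_mono hs (by omega) hrn
      omega
    rw [ih hub hskip']
    simp only [pvHit]
    constructor
    · rintro ⟨r, l', h1, h2, h3, h4, h5⟩; exact ⟨r, l', by omega, h2, h3, h4, h5⟩
    · rintro ⟨r, l', h1, h2, h3, h4, h5⟩
      refine ⟨r, l', ?_, h2, h3, h4, h5⟩
      rcases Nat.eq_or_lt_of_le h1 with rfl | h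
      · -- r = right impossible: the window ending at right is then shorter than min_count
        exfalso
        have hl'l : l ≤ l' := by
          by_contra hlt
          have hbad : s.getD right 0 - s.getD l' 0 > w := by
            by_cases hjl : l' < left
            · exact hskip l' hjl right (le_refl _) h2
            · exact pvAdv_skipped (left := left) l' (by omega) (by omega)
          omega
        omega
      · omega
  | case3 right left hr =>
    intro _ _
    simp only [pvHit]
    constructor
    · intro h; exact absurd h (by simp)
    · rintro ⟨r, l', h1, h2, _⟩; omega

-- A's scan decides the window-of-exactly-m form; bridge it to pvHit on a sorted list
theorem pvA_iff_hit {s : List Int} {w m : Int} (hs : s.Pairwise (· ≤ ·)) (hm : 1 ≤ m)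
    (hn : m ≤ (s.length : Int)) :
    ((PySem.List.pyRange 0 ((s.length : Int) - m + 1) 1).any (fun i =>
      match PySem.List.pyGet? s (i + m - 1), PySem.List.pyGet? s i with
      | some a, some b => decide (a - b ≤ w)
      | _, _ => false) = true) ↔ pvHit s w m 0 := by
  rw [List.any_eq_true]
  constructor
  · rintro ⟨i, hmem, hf⟩
    rw [PySem.List.mem_pyRange_one] at hmem
    obtain ⟨h0, h1⟩ := hmem
    have hi1 : 0 ≤ i + m - 1 := by omega
    have hi2 : i + m - 1 < (s.length : Int) := by omega
    have hi3 : i < (s.length : Int) := by omega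
    have e1 := PySem.List.pyGet?_eq_some_getElem s hi1 hi2
    have e2 := PySem.List.pyGet?_eq_some_getElem s h0 hi3
    rw [e1, e2] at hf
    simp only [decide_eq_true_eq] at hf
    refine ⟨(i + m - 1).toNat, i.toNat, by omega, by omega, by omega, by omega, ?_⟩
    rw [List.getD_eq_getElem s 0 (by omega), List.getD_eq_getElem s 0 (by omega)]
    omega
  · rintro ⟨r, l, _, hrn, hlr, hcnt, hle⟩
    refine ⟨(l : Int), ?_, ?_⟩
    · rw [PySem.List.mem_pyRange_one]; omega
    · have hi1 : (0:Int) ≤ (l : Int) + m - 1 := by omega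
      have hidx : ((l : Int) + m - 1).toNat < s.length := by omega
      have hi2 : (l : Int) + m - 1 < (s.length : Int) := by omega
      have e1 := PySem.List.pyGet?_eq_some_getElem s hi1 hi2
      have e2 := PySem.List.pyGet?_eq_some_getElem s (by omega : (0:Int) ≤ (l:Int)) (by omega : (l:Int) < (s.length : Int))
      rw [e1, e2]
      simp only [decide_eq_true_eq]
      have hrl : ((l : Int) + m - 1).toNat ≤ r := by omega
      have h1 : s.getD ((l : Int) + m - 1).toNat 0 ≤ s.getD r 0 := pv_getD_mono hs hrl hrn
      have hl2 : l < s.length := by omega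
      rw [List.getD_eq_getElem s 0 hidx, List.getD_eq_getElem s 0 hrn, List.getD_eq_getElem s 0 hl2] at *
      simp only [Int.toNat_natCast] at *
      omega

-- ===== VERDICT (by name: the statement is the Claim_ definition above) =====
theorem has_adr_cluster_py_spec : Claim_equal_has_adr_cluster_py := by
  intro sites window min_count _ hpre
  unfold Spec_has_adr_cluster_py has_adr_cluster_py has_adr_cluster_py_alt
  by_cases hlen : (sites.length : Int) < min_count
  · simp [hlen]
  · simp only [hlen, if_false]
    have hm : 1 ≤ min_count := hpre
    set s := PySem.List.sorted sites (fun x => x) false with hsdef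
    have hslen : s.length = sites.length := PySem.List.length_sorted ..
    have hs : s.Pairwise (· ≤ ·) := PySem.List.sorted_pairwise ..
    have hn : min_count ≤ (s.length : Int) := by rw [hslen]; omega
    rw [Bool.eq_iff_iff, pvA_iff_hit hs hm hn,
        pvGo_iff hs hm 0 0 (le_refl _) (by intro j hj; omega)]
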